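-- pv_equiv track=rewrite | github.com/kcollett1/ProjectEuler | solved/112_bouncynumbers/bouncynumbers.py | bouncy
-- ===== SOURCE A (Python) =====
-- def bouncy(n):
--     n = str(n)
--     if len(n) == 1: return 0
--
--     inc, dec = 1,1
--     prev = n[0]
--     for i in n[1:]:
--         if not inc and not dec: return 1
--         if int(i) < int(prev): inc = 0
--         elif int(i) > int(prev): dec = 0
--         prev = i
--
--     if not inc and not dec: return 1
--     return 0
-- ===== SOURCE B (Python) =====
-- def bouncy(n):
--     digits = [int(c) for c in str(n)]
--     return 0 if digits == sorted(digits) or digits == sorted(digits, reverse=True) else 1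
-- ===== Notes on version B (the rewrite author's own statement) =====
-- stated objective: simpler
-- what changed: Replaces the flag-tracking single pass over adjacent digit pairs (with a length-1 special case and early return) by building the digit list once and comparing it to its sorted and reverse-sorted forms.
import Mathlib
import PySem

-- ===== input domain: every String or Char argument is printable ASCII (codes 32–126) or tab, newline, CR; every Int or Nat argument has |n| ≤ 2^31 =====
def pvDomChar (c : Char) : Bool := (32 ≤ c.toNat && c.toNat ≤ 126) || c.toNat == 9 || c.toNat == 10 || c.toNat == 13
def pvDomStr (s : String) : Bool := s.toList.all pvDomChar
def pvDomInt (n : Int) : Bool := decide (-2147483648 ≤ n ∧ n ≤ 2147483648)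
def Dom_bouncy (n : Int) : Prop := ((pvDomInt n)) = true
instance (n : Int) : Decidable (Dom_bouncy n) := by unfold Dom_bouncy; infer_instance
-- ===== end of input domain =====

-- B replaces A's flag-tracking scan by a sort-and-compare check of the digit list; same values, not faster.

-- ===== PORT A =====
-- int(c) for a one-char string; the .getD 0 is unreachable under Pre_bouncy (every char of str(n), n ≥ 0, is a digit)
def pvIntOfChar (c : Char) : Int := (PySem.Int.ofChars? [c]).getD 0

-- the for-loop of A: flags inc/dec, current prev, early return when both flags are down
def bouncyGo (cs : List Char) (prev : Char) (inc dec : Int) : Int :=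
  match cs with
  | [] => if inc = 0 ∧ dec = 0 then 1 else 0
  | i :: t =>
    if inc = 0 ∧ dec = 0 then 1
    else if pvIntOfChar i < pvIntOfChar prev then bouncyGo t i 0 dec
    else if pvIntOfChar i > pvIntOfChar prev then bouncyGo t i inc 0
    else bouncyGo t i inc dec

def bouncy (n : Int) : Int :=
  let s := PySem.Int.toChars n
  if s.length = 1 then 0
  else
    match s with
    | [] => 0          -- unreachable: str(n) is never empty (n[0] would raise IndexError)
    | p :: rest => bouncyGo rest p 1 1

-- ===== PORT B =====
def bouncy_alt (n : Int) : Int :=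
  let digits := (PySem.Int.toChars n).map pvIntOfChar    -- int(c), same primitive helper as A
  if digits = PySem.List.sorted digits (fun x => x) false ∨
     digits = PySem.List.sorted digits (fun x => x) true then 0 else 1

-- ===== PRECONDITION & SPEC =====
-- Pre_ excludes negative n, on which Python's A raises ValueError (int('-') on the sign character).
def Pre_bouncy (n : Int) : Prop := 0 ≤ n
instance (n : Int) : Decidable (Pre_bouncy n) := by unfold Pre_bouncy; infer_instance
def pvWitness_bouncy : Int := 1748

def Spec_bouncy (n : Int) (out : Int) : Prop := out = bouncy_alt n
instance (n : Int) (out : Int) : Decidable (Spec_bouncy n out) := by unfold Spec_bouncy; infer_instance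

-- ===== CLAIM (what is proved, stated in full; the proofs are below) =====
def Claim_equal_bouncy : Prop := ∀ (n : Int), Dom_bouncy n → Pre_bouncy n → Spec_bouncy n (bouncy n)

-- ===== LEMMAS AND PROOFS =====

-- A's loop, characterised: it returns 0 iff a surviving flag matches a monotone chain of digit values.
theorem bouncyGo_spec (cs : List Char) (prev : Char) (inc dec : Int)
    (hi : inc = 0 ∨ inc = 1) (hd : dec = 0 ∨ dec = 1) :
    bouncyGo cs prev inc dec =
      if (inc = 1 ∧ List.IsChain (· ≤ ·) (pvIntOfChar prev :: cs.map pvIntOfChar)) ∨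
         (dec = 1 ∧ List.IsChain (· ≥ ·) (pvIntOfChar prev :: cs.map pvIntOfChar)) then 0 else 1 := by
  induction cs generalizing prev inc dec with
  | nil =>
    rcases hi with h | h <;> rcases hd with h' | h' <;>
      simp [bouncyGo, h, h', List.IsChain.singleton]
  | cons i t ih =>
    simp only [bouncyGo, List.map_cons, List.isChain_cons_cons]
    by_cases hz : inc = 0 ∧ dec = 0
    · rcases hz with ⟨h1, h2⟩
      simp [h1, h2]
    · rw [if_neg hz]
      by_cases hlt : pvIntOfChar i < pvIntOfChar prev
      · rw [if_pos hlt, ih i 0 dec (Or.inl rfl) hd]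
        have hnle : ¬ pvIntOfChar prev ≤ pvIntOfChar i := not_le.mpr hlt
        have hge : pvIntOfChar i ≤ pvIntOfChar prev := le_of_lt hlt
        by_cases hc : dec = 1 ∧ List.IsChain (· ≥ ·) (pvIntOfChar i :: t.map pvIntOfChar)
        · rw [if_pos (Or.inr hc), if_pos (Or.inr ⟨hc.1, hge, hc.2⟩)]
        · rw [if_neg (by rintro (⟨h1, _⟩ | ⟨h1, h3⟩)
                         · exact absurd h1 (by decide)
                         · exact hc ⟨h1, h3⟩),
              if_neg (by rintro (⟨h1, h2, _⟩ | ⟨h1, _, h3⟩)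
                         · exact hnle h2
                         · exact hc ⟨h1, h3⟩)]
      · rw [if_neg hlt]
        by_cases hgt : pvIntOfChar i > pvIntOfChar prev
        · rw [if_pos hgt, ih i inc 0 hi (Or.inl rfl)]
          have hnge : ¬ pvIntOfChar i ≤ pvIntOfChar prev := not_le.mpr hgt
          have hle : pvIntOfChar prev ≤ pvIntOfChar i := le_of_lt hgt
          by_cases hc : inc = 1 ∧ List.IsChain (· ≤ ·) (pvIntOfChar i :: t.map pvIntOfChar)
          · rw [if_pos (Or.inl hc), if_pos (Or.inl ⟨hc.1, hle, hc.2⟩)]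
          · rw [if_neg (by rintro (⟨h1, h3⟩ | ⟨h1, _⟩)
                           · exact hc ⟨h1, h3⟩
                           · exact absurd h1 (by decide)),
                if_neg (by rintro (⟨h1, _, h3⟩ | ⟨h1, h2, _⟩)
                           · exact hc ⟨h1, h3⟩
                           · exact hnge h2)]
        · rw [if_neg hgt, ih i inc dec hi hd]
          have heq : pvIntOfChar i = pvIntOfChar prev := le_antisymm (not_lt.mp hgt) (not_lt.mp hlt)
          simp [heq]

-- Python's 'digits == sorted(digits)' is exactly pairwise monotonicity.
theorem eq_sorted_iff_pairwise_le (ds : List Int) :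
    ds = PySem.List.sorted ds (fun x => x) false ↔ List.Pairwise (· ≤ ·) ds := by
  constructor
  · intro h
    have := PySem.List.sorted_pairwise (xs := ds) (key := fun x => x)
    rw [← h] at this
    exact this
  · intro h
    exact (PySem.List.sorted_eq_self_of_pairwise _ _ h).symm

theorem eq_sorted_rev_iff_pairwise_ge (ds : List Int) :
    ds = PySem.List.sorted ds (fun x => x) true ↔ List.Pairwise (· ≥ ·) ds := by
  constructor
  · intro h
    have := PySem.List.sorted_pairwise_rev (xs := ds) (key := fun x => x)
    rw [← h] at this
    exact this
  · intro h
    exact (PySem.List.sorted_rev_eq_self_of_pairwise _ _ h).symm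

-- ===== VERDICT (by name: the statement is the Claim_ definition above) =====
theorem bouncy_spec : Claim_equal_bouncy := by
  intro n _ _
  show bouncy n = bouncy_alt n
  unfold bouncy bouncy_alt
  cases hs : PySem.Int.toChars n with
  | nil => simp [PySem.List.sorted]
  | cons p rest =>
    simp only [List.length_cons, List.map_cons]
    rw [bouncyGo_spec rest p 1 1 (Or.inr rfl) (Or.inr rfl)]
    have h1 := eq_sorted_iff_pairwise_le (pvIntOfChar p :: rest.map pvIntOfChar)
    have h2 := eq_sorted_rev_iff_pairwise_ge (pvIntOfChar p :: rest.map pvIntOfChar)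
    have hc1 : List.IsChain (· ≤ ·) (pvIntOfChar p :: rest.map pvIntOfChar) ↔
        List.Pairwise (· ≤ ·) (pvIntOfChar p :: rest.map pvIntOfChar) :=
      List.isChain_iff_pairwise
    have hc2 : List.IsChain (· ≥ ·) (pvIntOfChar p :: rest.map pvIntOfChar) ↔
        List.Pairwise (· ≥ ·) (pvIntOfChar p :: rest.map pvIntOfChar) :=
      List.isChain_iff_pairwise
    by_cases hlen : rest.length + 1 = 1
    · have hre : rest = [] := by
        cases rest with
        | nil => rfl
        | cons a t => simp at hlen
      subst hre
      simp [PySem.List.sorted, PySem.List.insertBy]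
    · rw [if_neg hlen]
      by_cases hA : List.IsChain (· ≤ ·) (pvIntOfChar p :: rest.map pvIntOfChar) ∨
          List.IsChain (· ≥ ·) (pvIntOfChar p :: rest.map pvIntOfChar)
      · rw [if_pos (hA.imp (fun h => ⟨rfl, h⟩) (fun h => ⟨rfl, h⟩)), if_pos]
        rcases hA with h | h
        · exact Or.inl (h1.mpr (hc1.mp h))
        · exact Or.inr (h2.mpr (hc2.mp h))
      · rw [if_neg (by rintro (⟨_, h⟩ | ⟨_, h⟩)
                       · exact hA (Or.inl h)
                       · exact hA (Or.inr h)),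
            if_neg]
        rintro (h | h)
        · exact hA (Or.inl (hc1.mpr (h1.mp h)))
        · exact hA (Or.inr (hc2.mpr (h2.mp h)))
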